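-- pv_equiv track=rewrite | github.com/aerovfx/Fullstack4kid | TOPIC_PYTHON/TOPIC_PYTHONBASIC/Dethithcs/de8/ded8d_c1new2new.py | count_most_frequent_primes
-- ===== SOURCE A (Python) =====
-- def is_prime(n):
--     """
--     Kiểm tra xem một số có phải là số nguyên tố hay không.
--     """
--     if n < 2:
--         return False
--     for i in range(2, int(n**0.5) + 1):
--         if n % i == 0:
--             return False
--     return True
--
-- def count_most_frequent_primes(numbers):
--     """
--     Đếm số lượng số nguyên tố xuất hiện nhiều nhất trong dãy số.
--     """
--     primes = {}
--     for num in numbers: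
--         if is_prime(num):
--             if num in primes:
--                 primes[num] += 1
--             else:
--                 primes[num] = 1
--
--     if not primes:
--         return 0
--
--     max_count = max(primes.values())
--     max_count_primes = [prime for prime, count in primes.items() if count == max_count]
--
--     return len(max_count_primes)
-- ===== SOURCE B (Python) =====
-- def is_prime(n):
--     """
--     Kiểm tra xem một số có phải là số nguyên tố hay không.
--     """
--     if n < 2:
--         return False
--     for i in range(2, int(n**0.5) + 1):
--         if n % i == 0:
--             return False
--     return True
--
-- def count_most_frequent_primes(numbers):
--     # Sort the primes so equal values form adjacent runs, then count
--     # run lengths in one pass, tracking the best run and how many tie it.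
--     primes = sorted(x for x in numbers if is_prime(x))
--     best = 0
--     ties = 0
--     prev = None
--     run = 0
--     for x in primes:
--         if run > 0 and x == prev:
--             run += 1
--         else:
--             if run > best:
--                 best, ties = run, 1
--             elif run == best and run > 0:
--                 ties += 1
--             prev, run = x, 1
--     if run > best:
--         best, ties = run, 1
--     elif run == best and run > 0:
--         ties += 1
--     return ties
-- ===== Notes on version B (the rewrite author's own statement) =====
-- stated objective: alternative
-- what changed: B replaces A's dict-based frequency table (count per prime, max over values, filter of items) with sorting the primes and a single run-length scan that tracks the longest run and how many runs tie it.
import Mathlib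
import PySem

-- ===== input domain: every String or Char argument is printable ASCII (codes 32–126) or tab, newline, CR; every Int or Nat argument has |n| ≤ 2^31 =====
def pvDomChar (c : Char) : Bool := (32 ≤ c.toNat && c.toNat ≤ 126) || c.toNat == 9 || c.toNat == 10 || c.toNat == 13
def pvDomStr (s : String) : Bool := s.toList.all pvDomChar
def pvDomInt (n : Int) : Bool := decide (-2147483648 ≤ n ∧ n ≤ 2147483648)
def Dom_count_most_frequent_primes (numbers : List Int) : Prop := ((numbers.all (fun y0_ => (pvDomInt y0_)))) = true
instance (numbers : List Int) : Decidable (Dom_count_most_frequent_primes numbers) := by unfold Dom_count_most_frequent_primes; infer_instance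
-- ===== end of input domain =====

-- B replaces A's dict of per-prime counts with sorting the primes and one run-length scan (alternative decomposition, no speed claim).

-- ===== PORT A =====
-- helper is_prime (shared module helper, identical in Source A and Source B):
-- 'for i in range(2, int(n**0.5) + 1): if n % i == 0: return False' with early return.
-- int(n**0.5) = Nat.sqrt n.toNat exactly for 2 ≤ n ≤ 2^31 (double sqrt is correctly rounded there).
def trialLoop (n : Int) : List Int → Bool
  | [] => true
  | i :: rest => if PySem.Int.mod n i == 0 then false else trialLoop n rest

def is_prime (n : Int) : Bool :=
  if n < 2 then false
  else trialLoop n (PySem.List.pyRange 2 ((Nat.sqrt n.toNat : Int) + 1) 1)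

def count_most_frequent_primes (numbers : List Int) : Int :=
  let primes := numbers.foldl (fun d num =>
      if is_prime num then
        (if d.contains num then d.insert num (d.getD num 0 + 1) else d.insert num 1)
      else d) (PySem.Dict.empty : PySem.Dict Int Int)
  if primes.items = [] then 0
  else
    match PySem.List.max? primes.values (fun x => x) with
    | none => 0  -- unreachable: primes.values is nonempty when primes.items ≠ []
    | some max_count =>
        (((primes.items.filter (fun p => p.2 == max_count)).map (fun p => p.1)).length : Int)

-- ===== PORT B =====
-- loop body of Source B's single pass over the sorted primes; state = (best, ties, prev, run)
def stepB (st : Int × Int × Option Int × Int) (x : Int) : Int × Int × Option Int × Int :=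
  match st with
  | (best, ties, prev, run) =>
    if run > 0 ∧ prev = some x then (best, ties, prev, run + 1)
    else if run > best then (run, 1, some x, 1)
    else if run = best ∧ run > 0 then (best, ties + 1, some x, 1)
    else (best, ties, some x, 1)

def count_most_frequent_primes_alt (numbers : List Int) : Int :=
  let primes := PySem.List.sorted (numbers.filter (fun x => is_prime x)) (fun x => x) false
  match primes.foldl stepB (0, 0, none, 0) with
  | (best, ties, _, run) =>
    if run > best then 1 else if run = best ∧ run > 0 then ties + 1 else ties

-- ===== PRECONDITION & SPEC =====
def Spec_count_most_frequent_primes (numbers : List Int) (out : Int) : Prop := out = count_most_frequent_primes_alt numbers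
instance (numbers : List Int) (out : Int) : Decidable (Spec_count_most_frequent_primes numbers out) := by unfold Spec_count_most_frequent_primes; infer_instance

-- ===== CLAIM (what is proved, stated in full; the proofs are below) =====
def Claim_equal_count_most_frequent_primes : Prop := ∀ (numbers : List Int), Dom_count_most_frequent_primes numbers → Spec_count_most_frequent_primes numbers (count_most_frequent_primes numbers)

-- ===== LEMMAS AND PROOFS =====

-- the flush of a finished run into (best, ties), as Source B does it
def flushStep (bt : Int × Int) (c : Int) : Int × Int :=
  if c > bt.1 then (c, 1) else if c = bt.1 ∧ c > 0 then (bt.1, bt.2 + 1) else bt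

-- run-length encoding of a list
def runLens : List Int → List Int
  | [] => []
  | x :: T =>
      (1 + ((T.takeWhile (fun y => y == x)).length : Int)) :: runLens (T.dropWhile (fun y => y == x))
termination_by l => l.length
decreasing_by
  simpa using Nat.lt_succ_of_le (List.length_dropWhile_le _ _)

-- Source B's final flush, as a function of the loop state
def finalTies (st : Int × Int × Option Int × Int) : Int := (flushStep (st.1, st.2.1) st.2.2.2).2

lemma matchFinal (st : Int × Int × Option Int × Int) :
    (match st with
      | (best, ties, _, run) =>
        if run > best then (1 : Int) else if run = best ∧ run > 0 then ties + 1 else ties) =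
      finalTies st := by
  rcases st with ⟨b, t, p, r⟩
  unfold finalTies flushStep
  dsimp only
  split_ifs <;> rfl

lemma alt_eq_finalTies (numbers : List Int) :
    count_most_frequent_primes_alt numbers =
      finalTies ((PySem.List.sorted (numbers.filter (fun x => is_prime x)) (fun x => x) false).foldl
        stepB (0, 0, none, 0)) := by
  unfold count_most_frequent_primes_alt
  exact matchFinal _

lemma stepB_new (b t run x : Int) (p : Option Int) (h : ¬(run > 0 ∧ p = some x)) :
    stepB (b, t, p, run) x = ((flushStep (b, t) run).1, (flushStep (b, t) run).2, some x, 1) := by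
  unfold stepB flushStep
  dsimp only
  rw [if_neg h]
  split_ifs <;> rfl

lemma stepB_cont (b t run x : Int) (h : 1 ≤ run) :
    stepB (b, t, some x, run) x = (b, t, some x, run + 1) := by
  unfold stepB
  simp [show run > 0 by omega]

lemma foldl_stepB_replicate (k : Nat) (x : Int) (rest : List Int) (b t run : Int) (h : 1 ≤ run) :
    (List.replicate k x ++ rest).foldl stepB (b, t, some x, run) =
      rest.foldl stepB (b, t, some x, run + (k : Int)) := by
  induction k generalizing run with
  | zero => simp
  | succ k ih =>
      have harg : run + 1 + (k : Int) = run + ((k + 1 : Nat) : Int) := by push_cast; ring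
      rw [List.replicate_succ, List.cons_append, List.foldl_cons, stepB_cont b t run x h,
        ih (run + 1) (by omega), harg]

lemma takeWhile_eq_replicate (T : List Int) (x : Int) :
    T.takeWhile (fun y => y == x) = List.replicate (T.takeWhile (fun y => y == x)).length x := by
  rw [List.eq_replicate_iff]
  exact ⟨rfl, fun b hb => by simpa using List.mem_takeWhile_imp hb⟩

lemma dropWhile_head_ne (T : List Int) (x y : Int) (dr : List Int)
    (h : T.dropWhile (fun y => y == x) = y :: dr) : y ≠ x := by
  induction T with
  | nil => simp at h
  | cons a T ih =>
      rw [List.dropWhile_cons] at h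
      by_cases ha : a = x
      · rw [if_pos (by simp [ha])] at h; exact ih h
      · rw [if_neg (by simp [ha])] at h
        injection h with h1 _
        rw [← h1]; exact ha

lemma foldB_runs : ∀ (n : Nat) (T : List Int) (x b t run : Int), T.length ≤ n → 1 ≤ run →
    finalTies (T.foldl stepB (b, t, some x, run)) =
      (((run + ((T.takeWhile (fun y => y == x)).length : Int)) ::
          runLens (T.dropWhile (fun y => y == x))).foldl flushStep (b, t)).2 := by
  intro n
  induction n with
  | zero =>
      intro T x b t run hlen hrun
      have hT : T = [] := List.eq_nil_of_length_eq_zero (Nat.le_zero.mp hlen)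
      subst hT
      simp [runLens, finalTies]
  | succ n ih =>
      intro T x b t run hlen hrun
      conv_lhs => rw [← List.takeWhile_append_dropWhile (p := fun y => y == x) (l := T)]
      rw [takeWhile_eq_replicate T x]
      simp only [List.length_replicate]
      rw [foldl_stepB_replicate _ x _ b t run hrun]
      cases hdr : T.dropWhile (fun y => y == x) with
      | nil =>
          simp [runLens, finalTies]
      | cons y dr' =>
          rw [List.foldl_cons]
          have hyx : y ≠ x := dropWhile_head_ne T x y dr' hdr
          rw [stepB_new _ _ _ y (some x) (by simp [Ne.symm hyx])]
          have hlen' : dr'.length ≤ n := by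
            have hT := congrArg List.length
              (List.takeWhile_append_dropWhile (p := fun y => y == x) (l := T))
            rw [hdr] at hT
            simp [List.length_append] at hT
            omega
          rw [ih dr' y _ _ 1 hlen' (le_refl 1)]
          rw [runLens, List.foldl_cons, List.foldl_cons]
          rfl

lemma flushFold : ∀ (R : List Int), (∀ c ∈ R, 1 ≤ c) → ∀ b t : Int, 0 ≤ b →
    R.foldl flushStep (b, t) =
      (R.foldl max b,
        if R.foldl max b = b then t + (R.count b : Int) else (R.count (R.foldl max b) : Int)) := by
  intro R
  induction R with
  | nil => intro _ b t _; simp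
  | cons c R ih =>
      intro hpos b t hb
      have hc : 1 ≤ c := hpos c List.mem_cons_self
      have hpos' : ∀ d ∈ R, 1 ≤ d := fun d hd => hpos d (List.mem_cons_of_mem _ hd)
      simp only [List.foldl_cons]
      rcases lt_trichotomy b c with h1 | h1 | h1
      · -- new maximum run
        rw [show flushStep (b, t) c = (c, 1) from by unfold flushStep; rw [if_pos h1]]
        rw [ih hpos' c 1 (by omega), max_eq_right h1.le]
        have hm := (PySem.List.le_foldl_max R c).1
        rw [if_neg (by omega : ¬R.foldl max c = b)]
        congr 1
        by_cases h2 : R.foldl max c = c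
        · rw [if_pos h2, h2, List.count_cons]
          simp
          omega
        · rw [if_neg h2, List.count_cons]
          have hcM : (c == R.foldl max c) = false := by
            simp
            exact fun he => h2 he.symm
          rw [hcM]
          simp
      · -- tie with the current best
        subst h1
        rw [show flushStep (b, t) b = (b, t + 1) from by
          unfold flushStep; rw [if_neg (by omega), if_pos ⟨rfl, by omega⟩]]
        rw [ih hpos' b (t + 1) hb, max_self]
        congr 1
        by_cases h3 : R.foldl max b = b
        · rw [if_pos h3, if_pos h3, List.count_cons]
          simp
          omega
        · rw [if_neg h3, if_neg h3, List.count_cons]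
          have hcM : (b == R.foldl max b) = false := by
            simp
            exact fun he => h3 he.symm
          rw [hcM]
          simp
      · -- shorter run, nothing changes
        rw [show flushStep (b, t) c = (b, t) from by
          unfold flushStep; rw [if_neg (by omega), if_neg (fun hh => by omega)]]
        rw [ih hpos' b t hb, max_eq_left h1.le]
        have hm := (PySem.List.le_foldl_max R b).1
        congr 1
        by_cases h3 : R.foldl max b = b
        · rw [if_pos h3, if_pos h3, List.count_cons]
          have hcb : (c == b) = false := by simp; omega
          rw [hcb]
          simp
        · rw [if_neg h3, if_neg h3, List.count_cons]
          have hcM : (c == R.foldl max b) = false := by simp; omega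
          rw [hcM]
          simp

lemma runLens_spec : ∀ (n : Nat) (S : List Int), S.length ≤ n → S.Pairwise (· ≤ ·) →
    ∃ D : List Int, D.Nodup ∧ (∀ y, y ∈ D ↔ y ∈ S) ∧
      runLens S = D.map (fun v => (S.count v : Int)) := by
  intro n
  induction n with
  | zero =>
      intro S hlen _
      have hS : S = [] := List.eq_nil_of_length_eq_zero (Nat.le_zero.mp hlen)
      subst hS
      exact ⟨[], by simp, by simp, by simp [runLens]⟩
  | succ n ih =>
      intro S hlen hs
      cases S with
      | nil => exact ⟨[], by simp, by simp, by simp [runLens]⟩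
      | cons x T =>
          have hxT : ∀ y ∈ T, x ≤ y := (List.pairwise_cons.mp hs).1
          have hsT : T.Pairwise (· ≤ ·) := (List.pairwise_cons.mp hs).2
          have hsub : (T.dropWhile (fun y => y == x)).Sublist T := List.dropWhile_sublist _
          have hgt : ∀ z ∈ T.dropWhile (fun y => y == x), x < z := by
            cases hdr : T.dropWhile (fun y => y == x) with
            | nil => simp
            | cons y dr' =>
                have hyx : y ≠ x := dropWhile_head_ne T x y dr' hdr
                have hdrsub : (y :: dr').Sublist T := hdr ▸ hsub
                have hxy : x < y :=
                  lt_of_le_of_ne (hxT y (hdrsub.subset List.mem_cons_self)) (Ne.symm hyx)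
                have hpair : (y :: dr').Pairwise (· ≤ ·) := List.Pairwise.sublist hdrsub hsT
                intro z hz
                rcases List.mem_cons.mp hz with hz | hz
                · omega
                · have := (List.pairwise_cons.mp hpair).1 z hz
                  omega
          have hlen' : (T.dropWhile (fun y => y == x)).length ≤ n := by
            have := List.length_dropWhile_le (fun y => y == x) T
            simp at hlen
            omega
          obtain ⟨D', hnd', hmem', hrl'⟩ :=
            ih (T.dropWhile (fun y => y == x)) hlen' (List.Pairwise.sublist hsub hsT)
          refine ⟨x :: D', ?_, ?_, ?_⟩
          · refine List.nodup_cons.mpr ⟨fun hx => ?_, hnd'⟩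
            exact absurd (hgt x ((hmem' x).mp hx)) (lt_irrefl x)
          · intro y
            constructor
            · intro hy
              rcases List.mem_cons.mp hy with hy | hy
              · simp [hy]
              · exact List.mem_cons_of_mem x (hsub.subset ((hmem' y).mp hy))
            · intro hy
              rcases List.mem_cons.mp hy with hy | hy
              · simp [hy]
              · by_cases hyx : y = x
                · simp [hyx]
                · refine List.mem_cons_of_mem x ((hmem' y).mpr ?_)
                  have hT := List.takeWhile_append_dropWhile (p := fun y => y == x) (l := T)
                  rw [← hT] at hy
                  rcases List.mem_append.mp hy with hy | hy
                  · exact absurd (by simpa using List.mem_takeWhile_imp hy) hyx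
                  · exact hy
          · rw [show runLens (x :: T) =
                (1 + ((T.takeWhile (fun y => y == x)).length : Int)) ::
                  runLens (T.dropWhile (fun y => y == x)) from by rw [runLens]]
            rw [List.map_cons]
            congr 1
            · -- head: count of x in x :: T
              have hcT : T.count x =
                  (T.takeWhile (fun y => y == x)).length := by
                conv_lhs => rw [← List.takeWhile_append_dropWhile (p := fun y => y == x) (l := T)]
                rw [List.count_append,
                  List.count_eq_zero.mpr (fun hx => absurd (hgt x hx) (lt_irrefl x))]
                conv_lhs => rw [takeWhile_eq_replicate T x]
                simp
              rw [List.count_cons]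
              simp [hcT]
              omega
            · rw [hrl']
              refine List.map_congr_left (fun v hv => ?_)
              have hvdr : v ∈ T.dropWhile (fun y => y == x) := (hmem' v).mp hv
              have hxv : x < v := hgt v hvdr
              have : (x :: T).count v = (T.dropWhile (fun y => y == x)).count v := by
                rw [List.count_cons]
                have hxvne : (x == v) = false := by simp; omega
                rw [hxvne]
                conv_lhs => rw [← List.takeWhile_append_dropWhile (p := fun y => y == x) (l := T)]
                rw [List.count_append]
                conv_lhs => rw [takeWhile_eq_replicate T x]
                rw [List.count_replicate]
                have : (x == v) = false := by simp; omega
                simp [this]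
              rw [this]

-- A's dict-building loop is Counter(filter(is_prime, numbers))
lemma dictA_eq_counter (numbers : List Int) :
    numbers.foldl (fun d num =>
      if is_prime num then
        (if d.contains num then d.insert num (d.getD num 0 + 1) else d.insert num 1)
      else d) (PySem.Dict.empty : PySem.Dict Int Int) =
    PySem.Dict.counter (numbers.filter (fun x => is_prime x)) := by
  rw [PySem.List.foldl_if_eq_foldl_filter]
  have hstep : (fun (d : PySem.Dict Int Int) (num : Int) =>
      if d.contains num = true then d.insert num (d.getD num 0 + 1) else d.insert num 1) =
      (fun (d : PySem.Dict Int Int) (x : Int) => d.insert x (d.getD x 0 + 1)) := by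
    funext d x
    by_cases hc : d.contains x
    · rw [if_pos hc]
    · rw [if_neg (by simp [hc]), PySem.Dict.getD_of_not_contains d 0 (by simpa using hc)]
      norm_num
  rw [hstep]
  exact PySem.Dict.foldl_insert_getD_add_one_eq_counter _

theorem a_eq_b (numbers : List Int) :
    count_most_frequent_primes numbers = count_most_frequent_primes_alt numbers := by
  rw [alt_eq_finalTies numbers]
  simp only [count_most_frequent_primes, dictA_eq_counter numbers]
  by_cases hPnil : numbers.filter (fun x => is_prime x) = []
  · rw [hPnil]
    have hso : PySem.List.sorted ([] : List Int) (fun x => x) false = [] :=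
      (PySem.List.sorted_eq_nil_iff _ _ _).mpr rfl
    rw [hso]
    have hit : (PySem.Dict.counter ([] : List Int)).items = [] := by
      rw [PySem.Dict.items_counter]
      simp [PySem.Set.ofList]
    rw [if_pos hit]
    simp [finalTies, flushStep]
  · -- abbreviations (plain haves, no set, to keep rewriting predictable)
    have hSperm : (PySem.List.sorted (numbers.filter (fun x => is_prime x)) (fun x => x) false).Perm
        (numbers.filter (fun x => is_prime x)) := PySem.List.sorted_perm _ _ _
    have hSpair : (PySem.List.sorted (numbers.filter (fun x => is_prime x)) (fun x => x) false).Pairwise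
        (· ≤ ·) := by
      simpa using PySem.List.sorted_pairwise (numbers.filter (fun x => is_prime x)) (fun x => x)
    -- B side: reduce to the flushStep fold over runLens
    obtain ⟨D, hDnd, hDmem, hDrl⟩ :=
      runLens_spec (PySem.List.sorted (numbers.filter (fun x => is_prime x)) (fun x => x) false).length
        _ (le_refl _) hSpair
    have hDrl' : runLens (PySem.List.sorted (numbers.filter (fun x => is_prime x)) (fun x => x) false) =
        D.map (fun v => ((numbers.filter (fun x => is_prime x)).count v : Int)) := by
      rw [hDrl]
      exact List.map_congr_left (fun v _ => by rw [hSperm.count_eq v])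
    have hDmemP : ∀ v, v ∈ D ↔ v ∈ numbers.filter (fun x => is_prime x) := by
      intro v; rw [hDmem v, hSperm.mem_iff]
    have hposD : ∀ c ∈ D.map (fun v => ((numbers.filter (fun x => is_prime x)).count v : Int)), 1 ≤ c := by
      intro c hc
      obtain ⟨v, hv, rfl⟩ := List.mem_map.mp hc
      have hvP : v ∈ numbers.filter (fun x => is_prime x) := (hDmemP v).mp hv
      have := List.count_pos_iff.mpr hvP
      omega
    have hperm : (D.map (fun v => ((numbers.filter (fun x => is_prime x)).count v : Int))).Perm
        ((PySem.Set.ofList (numbers.filter (fun x => is_prime x))).map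
          (fun v => ((numbers.filter (fun x => is_prime x)).count v : Int))) := by
      refine List.Perm.map _ ?_
      rw [List.perm_ext_iff_of_nodup hDnd (PySem.Set.nodup_ofList _)]
      intro a
      rw [hDmemP a, PySem.Set.mem_ofList]
    cases hSc : PySem.List.sorted (numbers.filter (fun x => is_prime x)) (fun x => x) false with
    | nil => exact absurd ((PySem.List.sorted_eq_nil_iff _ _ _).mp hSc) hPnil
    | cons x T =>
        -- B value
        have hB : finalTies ((x :: T).foldl stepB (0, 0, none, 0)) =
            ((runLens (x :: T)).foldl flushStep (0, 0)).2 := by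
          rw [List.foldl_cons, stepB_new 0 0 0 x none (by simp)]
          have h00 : flushStep (0, 0) 0 = (0, 0) := by unfold flushStep; norm_num
          rw [h00]
          rw [foldB_runs T.length T x 0 0 1 (le_refl _) (le_refl 1)]
          rw [show runLens (x :: T) =
              (1 + ((T.takeWhile (fun y => y == x)).length : Int)) ::
                runLens (T.dropWhile (fun y => y == x)) from by rw [runLens]]
        rw [hSc] at hDrl'
        rw [hB, hDrl']
        rw [flushFold _ hposD 0 0 (le_refl 0)]
        -- the maximum frequency is at least 1
        have hxD : x ∈ D := by
          rw [hDmem x, hSc]; exact List.mem_cons_self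
        have hxP : x ∈ numbers.filter (fun x => is_prime x) := (hDmemP x).mp hxD
        have hM0pos : 1 ≤ (D.map (fun v =>
            ((numbers.filter (fun x => is_prime x)).count v : Int))).foldl max 0 := by
          have hmem : ((numbers.filter (fun x => is_prime x)).count x : Int) ∈
              D.map (fun v => ((numbers.filter (fun x => is_prime x)).count v : Int)) :=
            List.mem_map_of_mem hxD
          have h1 := (PySem.List.le_foldl_max
            (D.map (fun v => ((numbers.filter (fun x => is_prime x)).count v : Int))) 0).2 _ hmem
          have h2 := List.count_pos_iff.mpr hxP
          omega
        -- A side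
        have hitems := PySem.Dict.items_counter (numbers.filter (fun x => is_prime x))
        have hofne : PySem.Set.ofList (numbers.filter (fun x => is_prime x)) ≠ [] := by
          intro h
          have := (PySem.Set.mem_ofList (numbers.filter (fun x => is_prime x)) x).mpr hxP
          rw [h] at this
          simp at this
        have hitne : (PySem.Dict.counter (numbers.filter (fun x => is_prime x))).items ≠ [] := by
          rw [hitems]
          simpa using hofne
        rw [if_neg hitne]
        rw [if_neg (show ¬((D.map (fun v =>
            ((numbers.filter (fun x => is_prime x)).count v : Int))).foldl max 0 = 0) from by omega)]
        have hvalues : (PySem.Dict.counter (numbers.filter (fun x => is_prime x))).values =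
            (PySem.Set.ofList (numbers.filter (fun x => is_prime x))).map
              (fun v => ((numbers.filter (fun x => is_prime x)).count v : Int)) := by
          simp only [PySem.Dict.values, hitems, List.map_map]
          rfl
        cases hRc : (PySem.Set.ofList (numbers.filter (fun x => is_prime x))).map
            (fun v => ((numbers.filter (fun x => is_prime x)).count v : Int)) with
        | nil => exact absurd (List.map_eq_nil_iff.mp hRc) hofne
        | cons r rs =>
            rw [hvalues, hRc, PySem.List.max?_id_cons]
            -- reduce the match on `some …`
            show ((((PySem.Dict.counter (numbers.filter (fun x => is_prime x))).items.filter
                (fun p => p.2 == rs.foldl max r)).map (fun p => p.1)).length : Int) = _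
            -- identify the two maxima
        
            have hrpos : 1 ≤ r := by
              have : r ∈ r :: rs := List.mem_cons_self
              rw [← hRc] at this
              have := hposD r (hperm.mem_iff.mpr this)
              omega
            have hmax : rs.foldl max r =
                (D.map (fun v => ((numbers.filter (fun x => is_prime x)).count v : Int))).foldl max 0 := by
              have h1 : ((r :: rs).foldl max 0) = rs.foldl max r := by
                rw [List.foldl_cons, max_eq_right (by omega : (0:Int) ≤ r)]
              rw [← h1, ← hRc]
              exact (hperm.foldl_eq 0).symm
            -- count of the max among the frequencies
            have hcnt : (((PySem.Dict.counter (numbers.filter (fun x => is_prime x))).items.filter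
                (fun p => p.2 == rs.foldl max r)).map (fun p => p.1)).length =
                (D.map (fun v => ((numbers.filter (fun x => is_prime x)).count v : Int))).count
                  ((D.map (fun v => ((numbers.filter (fun x => is_prime x)).count v : Int))).foldl max 0) := by
              rw [List.length_map, hitems, ← List.countP_eq_length_filter, List.countP_map]
              rw [hperm.count_eq, List.count_eq_countP, List.countP_map, hmax]
              rfl
            rw [hcnt]

-- ===== VERDICT (by name: the statement is the Claim_ definition above) =====
theorem count_most_frequent_primes_spec : Claim_equal_count_most_frequent_primes := by
  intro numbers _
  unfold Spec_count_most_frequent_primes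
  exact a_eq_b numbers
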